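-- pv_equiv track=rewrite | github.com/PedroTheCreator/OBI | Mesa Redonda/round_table.py | chair_select
-- ===== SOURCE A (Python) =====
-- def chair_select(chairs, sort):
--   counter = 0
--   for i in range(0, sort):
--     if counter + 1 < 3:
--       counter += 1
--     else:
--       counter = 0
--   return (chairs[counter])
-- ===== SOURCE B (Python) =====
-- def chair_select(chairs, sort):
--   return chairs[max(sort, 0) % 3]
-- ===== Notes on version B (the rewrite author's own statement) =====
-- stated objective: simpler
-- what changed: replaces A's O(sort) modular counter loop by the closed-form index max(sort,0) % 3
import Mathlib
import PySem

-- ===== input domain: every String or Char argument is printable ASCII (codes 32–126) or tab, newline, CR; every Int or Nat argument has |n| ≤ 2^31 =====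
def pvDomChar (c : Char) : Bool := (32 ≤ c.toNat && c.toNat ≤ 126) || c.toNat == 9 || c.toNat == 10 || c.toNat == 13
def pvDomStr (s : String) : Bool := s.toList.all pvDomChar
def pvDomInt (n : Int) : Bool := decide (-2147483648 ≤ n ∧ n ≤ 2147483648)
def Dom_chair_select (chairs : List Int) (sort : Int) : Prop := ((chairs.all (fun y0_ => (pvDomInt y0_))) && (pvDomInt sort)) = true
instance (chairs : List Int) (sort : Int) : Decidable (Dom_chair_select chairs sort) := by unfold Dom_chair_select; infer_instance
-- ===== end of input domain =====

-- B replaces A's O(sort) modular counter loop by the closed-form index max(sort,0) % 3.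
-- ===== PORT A =====
def chair_select (chairs : List Int) (sort : Int) : Int :=
  let counter : Int :=
    (PySem.List.pyRange 0 sort 1).foldl
      (fun counter _i => if counter + 1 < 3 then counter + 1 else 0) 0
  PySem.List.pyGetD chairs counter 0  -- chairs[counter]; in range under Pre_

-- ===== PORT B =====
def chair_select_alt (chairs : List Int) (sort : Int) : Int :=
  PySem.List.pyGetD chairs (max sort 0 % 3) 0  -- chairs[max(sort,0) % 3]; in range under Pre_

-- ===== PRECONDITION & SPEC =====
-- Pre_ excludes exactly the inputs where A raises IndexError (index max(sort,0)%3 out of range).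
def Pre_chair_select (chairs : List Int) (sort : Int) : Prop :=
  max sort 0 % 3 < (chairs.length : Int)
instance (chairs : List Int) (sort : Int) : Decidable (Pre_chair_select chairs sort) := by
  unfold Pre_chair_select; infer_instance
def pvWitness_chair_select : List Int × Int := ([10, 20, 30], 5)

def Spec_chair_select (chairs : List Int) (sort : Int) (out : Int) : Prop := out = chair_select_alt chairs sort
instance (chairs : List Int) (sort : Int) (out : Int) : Decidable (Spec_chair_select chairs sort out) := by unfold Spec_chair_select; infer_instance

-- ===== CLAIM (what is proved, stated in full; the proofs are below) =====
def Claim_equal_chair_select : Prop := ∀ (chairs : List Int) (sort : Int), Dom_chair_select chairs sort → Pre_chair_select chairs sort → Spec_chair_select chairs sort (chair_select chairs sort)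

-- ===== LEMMAS AND PROOFS =====

-- ===== VERDICT (by name: the statement is the Claim_ definition above) =====
-- the loop counter after n iterations, started at c with 0 ≤ c < 3, is (c + n) % 3
theorem chair_counter_loop (l : List Int) : ∀ (c : Int), 0 ≤ c → c < 3 →
    l.foldl (fun counter _i => if counter + 1 < 3 then counter + 1 else 0) c
      = (c + l.length) % 3 := by
  induction l with
  | nil => intro c h0 h3; simp; omega
  | cons x l ih =>
    intro c h0 h3
    simp only [List.foldl_cons, List.length_cons]
    by_cases h : c + 1 < 3
    · rw [if_pos h, ih (c+1) (by omega) (by omega)]; omega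
    · rw [if_neg h, ih 0 (by omega) (by omega)]; omega

theorem chair_select_spec : Claim_equal_chair_select := by
  intro chairs sort _hdom _hpre
  unfold Spec_chair_select chair_select chair_select_alt
  rw [chair_counter_loop _ 0 (by omega) (by omega)]
  rw [PySem.List.length_pyRange_one]
  have h : ((0 : Int) + ((sort - 0).toNat : Int)) % 3 = max sort 0 % 3 := by omega
  rw [h]
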